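-- pv_equiv track=rewrite | github.com/carolina-trofimov/mystic_world | helpers_numerology.py | collapse_number
-- ===== SOURCE A (Python) =====
-- def collapse_number(number):
--
--     while number > 9:
--         if number == 11 or number == 22:
--             break
--         number_str = str(number)
--         result = 0
--         for n in number_str:
--             result = result + int(n)
--         number = result
--
--     return number
-- ===== SOURCE B (Python) =====
-- def _digit_sum(n):
--     s = 0
--     while n:
--         s += n % 10
--         n //= 10
--     return s
--
--
-- def collapse_number(number):
--     if number <= 9 or number == 11 or number == 22:
--         return number
--     return collapse_number(_digit_sum(number))
-- ===== Notes on version B (the rewrite author's own statement) =====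
-- stated objective: alternative
-- what changed: Replaces the iterative while-loop that stringifies the number and sums character digits with a recursive collapse whose digit sum is computed arithmetically via % 10 and // 10, never touching strings.
import Mathlib
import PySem

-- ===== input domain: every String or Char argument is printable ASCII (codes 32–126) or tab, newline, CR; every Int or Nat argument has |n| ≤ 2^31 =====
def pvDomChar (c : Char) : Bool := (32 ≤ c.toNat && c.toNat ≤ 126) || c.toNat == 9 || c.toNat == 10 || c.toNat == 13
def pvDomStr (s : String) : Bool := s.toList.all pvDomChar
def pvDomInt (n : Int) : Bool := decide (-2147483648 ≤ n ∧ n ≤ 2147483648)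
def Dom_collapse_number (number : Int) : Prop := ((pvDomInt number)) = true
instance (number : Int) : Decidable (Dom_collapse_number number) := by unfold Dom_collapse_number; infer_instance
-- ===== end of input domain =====

-- B replaces A's string-based digit-summing while-loop by a recursive collapse with an
-- arithmetic (%, //) digit sum; same values everywhere, no speed claim.

-- ===== PORT A =====
-- A's while-loop, fueled (fuel number.toNat+1 always suffices: the digit sum of n
-- strictly decreases for n > 9, and the loop body never runs otherwise).
def collapseLoopA : Nat → Int → Int
  | 0, number => number
  | f + 1, number =>
    if number > 9 then
      if number = 11 ∨ number = 22 then number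
      else
        -- number_str = str(number); result = Σ int(n): int(n) on a single decimal digit
        -- char is exactly (code - 48); only digit chars occur here since number > 9.
        let number_str := PySem.Int.toChars number
        let result := number_str.foldl (fun result n => result + ((n.toNat : Int) - 48)) 0
        collapseLoopA f result
    else number

def collapse_number (number : Int) : Int := collapseLoopA (number.toNat + 1) number

-- ===== PORT B =====
-- Source B's _digit_sum while-loop, fueled (n.toNat+1 fuel covers all its digits).
def pvDigitSumLoop : Nat → Int → Int → Int
  | 0, _, s => s
  | f + 1, n, s =>
    if n ≠ 0 then pvDigitSumLoop f (PySem.Int.floordiv n 10) (s + PySem.Int.mod n 10) else s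

def pvDigitSum (n : Int) : Int := pvDigitSumLoop (n.toNat + 1) n 0

-- Source B's recursion, fueled the same way.
def collapseRecB : Nat → Int → Int
  | 0, number => number
  | f + 1, number =>
    if number ≤ 9 ∨ number = 11 ∨ number = 22 then number
    else collapseRecB f (pvDigitSum number)

def collapse_number_alt (number : Int) : Int := collapseRecB (number.toNat + 1) number

-- ===== PRECONDITION & SPEC =====
def Spec_collapse_number (number : Int) (out : Int) : Prop := out = collapse_number_alt number
instance (number : Int) (out : Int) : Decidable (Spec_collapse_number number out) := by
  unfold Spec_collapse_number; infer_instance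

-- ===== CLAIM (what is proved, stated in full; the proofs are below) =====
def Claim_equal_collapse_number : Prop :=
  ∀ (number : Int), Dom_collapse_number number → Spec_collapse_number number (collapse_number number)

-- ===== LEMMAS AND PROOFS =====

-- mathematical digit sum, reference for both ports
def dsumN (n : Nat) : Nat :=
  if n < 10 then n else dsumN (n / 10) + n % 10
termination_by n
decreasing_by exact Nat.div_lt_self (by omega) (by omega)

lemma dsumN_step (n : Nat) : dsumN n = dsumN (n / 10) + n % 10 := by
  rw [dsumN]
  split_ifs with h
  · have h0 : n / 10 = 0 := Nat.div_eq_of_lt h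
    rw [h0, dsumN]
    simp
    omega
  · rfl

-- value of a decimal digit char
lemma digitChar_val (m : Nat) (h : m < 10) : ((Nat.digitChar m).toNat : Int) - 48 = m := by
  interval_cases m <;> rfl

def csum (l : List Char) : Int := (l.map (fun c => (c.toNat : Int) - 48)).sum

lemma core_sum : ∀ (f n : Nat) (acc : List Char), n < 10 ^ f →
    csum (Nat.toDigitsCore 10 f n acc) = (dsumN n : Int) + csum acc := by
  intro f
  induction f with
  | zero =>
    intro n acc h
    have : n = 0 := by simpa using h
    subst this
    simp [Nat.toDigitsCore, dsumN]
  | succ f ih =>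
    intro n acc h
    simp only [Nat.toDigitsCore]
    by_cases h0 : n / 10 = 0
    · have hn : n < 10 := by omega
      simp only [h0, if_true]
      have hd : dsumN n = n := by rw [dsumN]; simp [hn]
      simp [csum, hd, digitChar_val n hn, Nat.mod_eq_of_lt hn]
    · simp only [h0, if_false]
      have hlt : n / 10 < 10 ^ f := by
        have hmul : n < 10 * 10 ^ f := by rw [← pow_succ']; exact h
        exact Nat.div_lt_of_lt_mul hmul
      rw [ih (n / 10) _ hlt]
      have hc : csum (Nat.digitChar (n % 10) :: acc) = (n % 10 : Int) + csum acc := by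
        simp [csum, digitChar_val (n % 10) (by omega)]
      rw [hc, dsumN_step n]
      push_cast
      ring

lemma toChars_sum (n : Int) (h : 0 < n) :
    csum (PySem.Int.toChars n) = (dsumN n.toNat : Int) := by
  have hneg : ¬ n < 0 := by omega
  simp only [PySem.Int.toChars, hneg, if_false, Nat.toDigits]
  have hfuel : n.toNat < 10 ^ (n.toNat + 1) :=
    lt_of_lt_of_le (Nat.lt_pow_self (by omega)) (Nat.pow_le_pow_right (by omega) (by omega))
  simpa [csum] using core_sum (n.toNat + 1) n.toNat [] hfuel

lemma dsum_loop : ∀ (f : Nat), ∀ (n : Nat), n < 10 ^ f → ∀ (s : Int),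
    pvDigitSumLoop f (n : Int) s = s + (dsumN n : Int) := by
  intro f
  induction f with
  | zero =>
    intro n h s
    have : n = 0 := by simpa using h
    subst this
    simp [pvDigitSumLoop, dsumN]
  | succ f ih =>
    intro n h s
    by_cases h0 : n = 0
    · subst h0; simp [pvDigitSumLoop, dsumN]
    · have hne : (n : Int) ≠ 0 := by exact_mod_cast h0
      simp only [pvDigitSumLoop, hne, if_true, ne_eq, not_false_eq_true]
      have hfd : PySem.Int.floordiv (n : Int) 10 = ((n / 10 : Nat) : Int) := by
        exact_mod_cast PySem.Int.floordiv_natCast n 10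
      have hmd : PySem.Int.mod (n : Int) 10 = ((n % 10 : Nat) : Int) := by
        exact_mod_cast PySem.Int.mod_natCast n 10
      rw [hfd, hmd]
      have hlt : n / 10 < 10 ^ f := by
        have hmul : n < 10 * 10 ^ f := by rw [← pow_succ']; exact h
        exact Nat.div_lt_of_lt_mul hmul
      rw [ih (n / 10) hlt]
      rw [dsumN_step n]
      push_cast
      ring

lemma pvDigitSum_eq (n : Int) (h : 0 ≤ n) : pvDigitSum n = (dsumN n.toNat : Int) := by
  have hn : n = ((n.toNat : Nat) : Int) := by omega
  have hfuel : n.toNat < 10 ^ (n.toNat + 1) :=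
    lt_of_lt_of_le (Nat.lt_pow_self (by omega)) (Nat.pow_le_pow_right (by omega) (by omega))
  rw [pvDigitSum, hn]
  simp only [Int.toNat_natCast]
  rw [dsum_loop (n.toNat + 1) n.toNat hfuel]
  simp

lemma loop_eq_rec : ∀ (f : Nat) (n : Int), collapseLoopA f n = collapseRecB f n := by
  intro f
  induction f with
  | zero => intro n; rfl
  | succ f ih =>
    intro n
    simp only [collapseLoopA, collapseRecB]
    by_cases hgt : n > 9
    · by_cases hm : n = 11 ∨ n = 22
      · simp [hgt, hm]
      · have hle : ¬ (n ≤ 9 ∨ n = 11 ∨ n = 22) := by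
          push Not at hm ⊢
          exact ⟨by omega, hm.1, hm.2⟩
        rw [if_pos hgt, if_neg hm, if_neg hle]
        have hsum : (PySem.Int.toChars n).foldl
            (fun result c => result + ((c.toNat : Int) - 48)) 0 = pvDigitSum n := by
          rw [PySem.List.foldl_add, pvDigitSum_eq n (by omega), ← toChars_sum n (by omega)]
          simp [csum]
        rw [hsum]
        exact ih _
    · have hle : n ≤ 9 ∨ n = 11 ∨ n = 22 := Or.inl (by omega)
      simp [hgt, hle]

-- ===== VERDICT (by name: the statement is the Claim_ definition above) =====
theorem collapse_number_spec : Claim_equal_collapse_number := by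
  intro number _
  unfold Spec_collapse_number collapse_number collapse_number_alt
  exact loop_eq_rec _ _
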